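-- pv_equiv track=rewrite | github.com/tranducthao243/ffdatareport | app/private_reports.py | _group_channels_by_platform
-- ===== SOURCE A (Python) =====
-- from typing import Any
--
-- def _group_channels_by_platform(channels: list[dict[str, Any]]) -> dict[str, list[str]]:
--     grouped: dict[str, list[str]] = {"youtube": [], "tiktok": [], "facebook": []}
--     for channel in channels:
--         platform = str(channel.get("platform") or "").strip().lower()
--         label = str(channel.get("channelName") or channel.get("channelId") or "").strip()
--         if not platform or not label:
--             continue
--         grouped.setdefault(platform, [])
--         if label not in grouped[platform]:
--             grouped[platform].append(label)
--     return grouped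
-- ===== SOURCE B (Python) =====
-- def _group_channels_by_platform(channels):
--     def clean(channel):
--         platform = str(channel.get("platform") or "").strip().lower()
--         label = str(channel.get("channelName") or channel.get("channelId") or "").strip()
--         return (platform, label)
--     # Flat list of cleaned (platform, label) pairs, duplicates kept.
--     pairs = [pl for pl in map(clean, channels) if pl[0] and pl[1]]
--     # Key order: three preset platforms, then new ones in first-seen order.
--     keys = list(dict.fromkeys(["youtube", "tiktok", "facebook"] + [p for p, _ in pairs]))
--     # Build the result key by key, deduplicating labels in first-seen order.
--     return {k: list(dict.fromkeys(l for p, l in pairs if p == k)) for k in keys}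
-- ===== Notes on version B (the rewrite author's own statement) =====
-- stated objective: alternative
-- what changed: A builds the result by mutating a dict in one pass, testing membership before each append; B never mutates a dict: it first flattens the input to a list of cleaned (platform,label) pairs, computes the key order as an ordered dedup of the preset keys plus the pair platforms, and then constructs the result key by key, each value an ordered dedup of that key's labels filtered from the flat pair list.
import Mathlib
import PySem

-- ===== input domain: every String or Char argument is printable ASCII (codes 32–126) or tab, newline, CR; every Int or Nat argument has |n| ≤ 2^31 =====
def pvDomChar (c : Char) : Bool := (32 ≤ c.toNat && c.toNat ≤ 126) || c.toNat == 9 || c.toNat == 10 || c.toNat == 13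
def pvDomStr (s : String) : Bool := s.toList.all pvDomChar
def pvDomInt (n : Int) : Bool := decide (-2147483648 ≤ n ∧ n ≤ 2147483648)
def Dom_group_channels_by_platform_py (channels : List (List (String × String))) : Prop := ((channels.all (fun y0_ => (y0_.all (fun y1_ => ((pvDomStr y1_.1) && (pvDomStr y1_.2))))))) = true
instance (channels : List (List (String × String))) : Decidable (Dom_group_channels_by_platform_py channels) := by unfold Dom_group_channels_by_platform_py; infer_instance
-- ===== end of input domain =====

-- B replaces A's single dict-mutating pass by a flatten / key-list / per-key build
-- pipeline (same return value; objective: alternative decomposition, no speed claim).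

-- ===== PORT A =====
-- platform = str(channel.get("platform") or "").strip().lower()
def gcbpPlatform (channel : List (String × String)) : String :=
  PySem.Str.lower (PySem.Str.strip (((PySem.Dict.mk channel).get? "platform").getD ""))

-- label = str(channel.get("channelName") or channel.get("channelId") or "").strip()
def gcbpLabel (channel : List (String × String)) : String :=
  let cn := ((PySem.Dict.mk channel).get? "channelName").getD ""
  let cid := ((PySem.Dict.mk channel).get? "channelId").getD ""
  PySem.Str.strip (if cn ≠ "" then cn else cid)

def gcbpInit : PySem.Dict String (List String) :=
  PySem.Dict.mk [("youtube", []), ("tiktok", []), ("facebook", [])]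

-- loop body of A: setdefault, then append only if the label is not yet present
def gcbpStepA (d : PySem.Dict String (List String)) (channel : List (String × String)) :
    PySem.Dict String (List String) :=
  let platform := gcbpPlatform channel
  let label := gcbpLabel channel
  if platform = "" ∨ label = "" then d
  else
    let d1 := d.setdefault platform []
    if label ∈ d1.getD platform [] then d1
    else d1.insert platform (d1.getD platform [] ++ [label])

def group_channels_by_platform_py (channels : List (List (String × String))) :
    List (String × List String) :=
  (channels.foldl gcbpStepA gcbpInit).items

-- ===== PORT B =====
-- clean(channel) = (platform, label), both cleaned as in the Python
def gcbpClean (channel : List (String × String)) : String × String :=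
  let platform := PySem.Str.lower (PySem.Str.strip (((PySem.Dict.mk channel).get? "platform").getD ""))
  let cn := ((PySem.Dict.mk channel).get? "channelName").getD ""
  let label := PySem.Str.strip (if cn ≠ "" then cn else ((PySem.Dict.mk channel).get? "channelId").getD "")
  (platform, label)

def group_channels_by_platform_py_alt (channels : List (List (String × String))) :
    List (String × List String) :=
  -- pairs = [pl for pl in map(clean, channels) if pl[0] and pl[1]]
  let pairs := (channels.map gcbpClean).filter (fun q => !(q.1 == "") && !(q.2 == ""))
  -- keys = list(dict.fromkeys(["youtube","tiktok","facebook"] + [p for p,_ in pairs]))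
  let keys := PySem.List.dedup (["youtube", "tiktok", "facebook"] ++ pairs.map Prod.fst)
  -- {k: list(dict.fromkeys(l for p, l in pairs if p == k)) for k in keys}
  keys.map (fun k => (k, PySem.List.dedup ((pairs.filter (fun q => q.1 == k)).map Prod.snd)))

-- ===== PRECONDITION & SPEC =====
def Spec_group_channels_by_platform_py (channels : List (List (String × String))) (out : List (String × List String)) : Prop := out = group_channels_by_platform_py_alt channels
instance (channels : List (List (String × String))) (out : List (String × List String)) : Decidable (Spec_group_channels_by_platform_py channels out) := by unfold Spec_group_channels_by_platform_py; infer_instance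

-- ===== CLAIM (what is proved, stated in full; the proofs are below) =====
def Claim_equal_group_channels_by_platform_py : Prop := ∀ (channels : List (List (String × String))), Dom_group_channels_by_platform_py channels → Spec_group_channels_by_platform_py channels (group_channels_by_platform_py channels)

-- ===== LEMMAS AND PROOFS =====

theorem gcbpClean_eq (c : List (String × String)) :
    gcbpClean c = (gcbpPlatform c, gcbpLabel c) := rfl

-- A's loop body, re-expressed on an already-cleaned pair
def gcbpPairStep (d : PySem.Dict String (List String)) (q : String × String) :
    PySem.Dict String (List String) :=
  if q.2 ∈ (d.setdefault q.1 []).getD q.1 [] then d.setdefault q.1 []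
  else (d.setdefault q.1 []).insert q.1 ((d.setdefault q.1 []).getD q.1 [] ++ [q.2])

theorem gcbpStepA_eq (d : PySem.Dict String (List String)) (c : List (String × String)) :
    gcbpStepA d c =
      if gcbpPlatform c = "" ∨ gcbpLabel c = "" then d
      else gcbpPairStep d (gcbpPlatform c, gcbpLabel c) := rfl

-- A's fold over channels = fold of the pair step over B's cleaned pair list
theorem gcbp_fold_eq (channels : List (List (String × String)))
    (d : PySem.Dict String (List String)) :
    channels.foldl gcbpStepA d =
      ((channels.map gcbpClean).filter (fun q => !(q.1 == "") && !(q.2 == ""))).foldl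
        gcbpPairStep d := by
  induction channels generalizing d with
  | nil => rfl
  | cons c cs ih =>
    simp only [List.map_cons, List.filter_cons, gcbpClean_eq, List.foldl_cons, gcbpStepA_eq]
    by_cases hskip : gcbpPlatform c = "" ∨ gcbpLabel c = ""
    · have hb : (!(gcbpPlatform c == "") && !(gcbpLabel c == "")) = false := by
        rcases hskip with h | h <;> simp [h]
      rw [hb, if_pos hskip]
      simp only [Bool.false_eq_true, if_false]
      exact ih d
    · push Not at hskip
      have hb : (!(gcbpPlatform c == "") && !(gcbpLabel c == "")) = true := by
        simp [hskip.1, hskip.2]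
      rw [hb, if_neg (by push Not; exact hskip)]
      simp only [if_true, List.foldl_cons]
      exact ih _


-- one pair-step's effect on the key list is exactly Set.add
theorem gcbp_keys_step (d : PySem.Dict String (List String)) (q : String × String) :
    (gcbpPairStep d q).keys = PySem.Set.add d.keys q.1 := by
  unfold gcbpPairStep
  by_cases hc : d.contains q.1 = true
  · rw [PySem.Dict.setdefault_of_contains d [] hc]
    have hmem : q.1 ∈ d.keys := by
      rw [PySem.Dict.contains_eq_decide_mem_keys] at hc; simpa using hc
    have hadd : PySem.Set.add d.keys q.1 = d.keys := by
      simp [PySem.Set.add, PySem.Set.contains, hmem]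
    split_ifs with h
    · rw [hadd]
    · rw [PySem.Dict.keys_insert_of_contains d _ hc, hadd]
  · have hc' : d.contains q.1 = false := by simpa using hc
    rw [PySem.Dict.setdefault_of_not_contains d [] hc']
    have hmem : q.1 ∉ d.keys := by
      rw [PySem.Dict.contains_eq_decide_mem_keys] at hc'; simpa using hc'
    have hz : (d.insert q.1 []).getD q.1 ([] : List String) = [] :=
      PySem.Dict.getD_insert_self d q.1 [] []
    rw [hz, if_neg (by simp)]
    have hcin : (d.insert q.1 []).contains q.1 = true := by
      rw [PySem.Dict.contains_eq_decide_mem_keys]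
      simp [PySem.Dict.mem_keys_insert]
    rw [PySem.Dict.keys_insert_of_contains _ _ hcin,
      PySem.Dict.keys_insert_of_not_contains d _ hc']
    simp [PySem.Set.add, PySem.Set.contains, hmem]

-- one pair-step's effect on the value at k
theorem gcbp_getD_step (d : PySem.Dict String (List String)) (q : String × String) (k : String) :
    (gcbpPairStep d q).getD k [] =
      if q.1 = k then PySem.Set.add (d.getD k []) q.2 else d.getD k [] := by
  unfold gcbpPairStep
  by_cases hk : q.1 = k
  · subst hk
    simp only []
    by_cases hc : d.contains q.1 = true
    · rw [PySem.Dict.setdefault_of_contains d [] hc]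
      split_ifs with h
      · simp [PySem.Set.add, PySem.Set.contains, h]
      · rw [PySem.Dict.getD_insert_self]
        simp [PySem.Set.add, PySem.Set.contains, h]
    · have hc' : d.contains q.1 = false := by simpa using hc
      rw [PySem.Dict.setdefault_of_not_contains d [] hc']
      have hz : (d.insert q.1 []).getD q.1 ([] : List String) = [] :=
        PySem.Dict.getD_insert_self d q.1 [] []
      rw [hz, if_neg (by simp)]
      have hd0 : d.getD q.1 ([] : List String) = [] := by
        rw [PySem.Dict.getD_eq_get?_getD]
        have : d.get? q.1 = none := by
          rw [PySem.Dict.get?_eq_none_iff_contains]; exact hc'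
        simp [this]
      rw [PySem.Dict.getD_insert_self, hd0]
      simp [PySem.Set.add, PySem.Set.contains]
  · simp only [if_neg hk]
    have hs : (d.setdefault q.1 []).getD k ([] : List String) = d.getD k [] := by
      rw [PySem.Dict.getD_eq_get?_getD, PySem.Dict.get?_setdefault_of_ne,
        ← PySem.Dict.getD_eq_get?_getD]
      exact fun h => hk h.symm
    split_ifs with h
    · exact hs
    · rw [PySem.Dict.getD_insert_of_ne _ _ _ (fun h => hk h.symm), hs]

-- the pair fold's key list
theorem gcbp_keys_fold (pairs : List (String × String)) (d : PySem.Dict String (List String)) :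
    (pairs.foldl gcbpPairStep d).keys = (pairs.map Prod.fst).foldl PySem.Set.add d.keys := by
  induction pairs generalizing d with
  | nil => rfl
  | cons q qs ih => rw [List.foldl_cons, List.map_cons, List.foldl_cons, ih, gcbp_keys_step]

-- the pair fold's value at k
theorem gcbp_getD_fold (pairs : List (String × String)) (d : PySem.Dict String (List String))
    (k : String) :
    (pairs.foldl gcbpPairStep d).getD k [] =
      ((pairs.filter (fun q => q.1 == k)).map Prod.snd).foldl PySem.Set.add (d.getD k []) := by
  induction pairs generalizing d with
  | nil => rfl
  | cons q qs ih =>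
    rw [List.foldl_cons, List.filter_cons, ih]
    by_cases hk : q.1 = k
    · simp [hk, gcbp_getD_step]
    · simp [hk, gcbp_getD_step]

theorem gcbp_nodup_add_fold (xs : List String) (s : List String) (h : s.Nodup) :
    (xs.foldl PySem.Set.add s).Nodup := by
  induction xs generalizing s with
  | nil => exact h
  | cons x xs ih =>
    rw [List.foldl_cons]
    refine ih _ ?_
    unfold PySem.Set.add PySem.Set.contains
    split_ifs with hm
    · exact h
    · have hx : x ∉ s := by
        intro hxs
        simp [hxs] at hm
      exact List.Nodup.append h (List.nodup_singleton x) (by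
        intro a ha hb; simp only [List.mem_singleton] at hb; exact hx (hb ▸ ha))

theorem gcbp_init_getD (k : String) : gcbpInit.getD k ([] : List String) = [] := by
  simp only [gcbpInit, PySem.Dict.getD_eq_get?_getD, PySem.Dict.get?_mk_cons]
  split_ifs <;> rfl

-- ===== VERDICT (by name: the statement is the Claim_ definition above) =====
theorem group_channels_by_platform_py_spec : Claim_equal_group_channels_by_platform_py := by
  intro channels _
  unfold Spec_group_channels_by_platform_py group_channels_by_platform_py
    group_channels_by_platform_py_alt
  rw [gcbp_fold_eq]
  set pairs := (channels.map gcbpClean).filter (fun q => !(q.1 == "") && !(q.2 == "")) with hpairs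
  set a := pairs.foldl gcbpPairStep gcbpInit with ha
  have hkeys : a.keys = (pairs.map Prod.fst).foldl PySem.Set.add gcbpInit.keys :=
    gcbp_keys_fold pairs gcbpInit
  have hinitk : gcbpInit.keys = ["youtube", "tiktok", "facebook"] := rfl
  have hBkeys : PySem.List.dedup (["youtube", "tiktok", "facebook"] ++ pairs.map Prod.fst)
      = a.keys := by
    rw [hkeys, hinitk, PySem.List.dedup_eq_ofList, PySem.Set.ofList_eq_foldl,
      List.foldl_append]
    rfl
  have hnd : a.keys.Nodup := by
    rw [hkeys]; exact gcbp_nodup_add_fold _ _ (by rw [hinitk]; decide)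
  rw [PySem.Dict.items_eq_map_keys a hnd ([] : List String), ← hBkeys]
  refine List.map_congr_left (fun k _ => ?_)
  rw [ha, gcbp_getD_fold, gcbp_init_getD, PySem.List.dedup_eq_ofList,
    PySem.Set.ofList_eq_foldl]
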